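-- pv_equiv track=rewrite | github.com/caoww20/MNV-analysis | 01toolCompare/method/Qing/qing/MNVIdentifyMulti.py | expandPoint
-- ===== SOURCE A (Python) =====
-- def expandPoint(p,mnv_distance,pos_dict):
--     pp=list(set(pos_dict[p[0]]+pos_dict[p[-1]]))
--     pp.sort()
--     start=p[-1]-mnv_distance
--     end=p[0]+mnv_distance
--     newpp=[]
--     for n in pp:
--         if n >=start and n <=end:
--             newpp.append(n)
--     return newpp
-- ===== SOURCE B (Python) =====
-- def expandPoint(p, mnv_distance, pos_dict):
--     start = p[-1] - mnv_distance
--     end = p[0] + mnv_distance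
--     out = []
--     for n in pos_dict[p[0]] + pos_dict[p[-1]]:
--         if start <= n <= end:
--             i = 0
--             while i < len(out) and out[i] < n:
--                 i += 1
--             if i == len(out) or out[i] != n:
--                 out.insert(i, n)
--     return out
-- ===== Notes on version B (the rewrite author's own statement) =====
-- stated objective: alternative
-- what changed: B never builds a set and never calls sort: it makes one pass over the concatenated candidate lists and maintains a sorted duplicate-free accumulator by ordered insertion (skipping out-of-range values and values already present), whereas A dedupes with a set, sorts everything, then scans with a range filter.
import Mathlib
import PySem

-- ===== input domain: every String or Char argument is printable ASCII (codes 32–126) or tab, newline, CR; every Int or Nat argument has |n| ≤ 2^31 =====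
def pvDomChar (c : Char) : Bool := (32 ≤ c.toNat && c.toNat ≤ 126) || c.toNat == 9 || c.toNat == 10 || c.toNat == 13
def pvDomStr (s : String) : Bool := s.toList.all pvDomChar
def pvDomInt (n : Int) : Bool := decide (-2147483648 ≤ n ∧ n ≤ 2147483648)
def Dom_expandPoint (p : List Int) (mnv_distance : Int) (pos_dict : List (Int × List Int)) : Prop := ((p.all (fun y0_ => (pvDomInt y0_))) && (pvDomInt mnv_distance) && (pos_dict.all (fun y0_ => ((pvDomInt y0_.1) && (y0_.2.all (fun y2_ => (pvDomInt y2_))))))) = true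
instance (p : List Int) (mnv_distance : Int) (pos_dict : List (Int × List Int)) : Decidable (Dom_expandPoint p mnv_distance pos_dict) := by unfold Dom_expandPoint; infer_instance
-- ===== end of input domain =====

-- B never builds a set and never sorts: one pass over the candidates, keeping a sorted
-- duplicate-free accumulator by ordered insertion of the in-range values (objective: alternative).

-- ===== PORT A =====
def expandPoint (p : List Int) (mnv_distance : Int) (pos_dict : List (Int × List Int)) : List Int :=
  match PySem.List.pyGet? p 0, PySem.List.pyGet? p (-1) with
  | some p0, some plast =>
    match (PySem.Dict.mk pos_dict).get? p0, (PySem.Dict.mk pos_dict).get? plast with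
    | some l0, some l1 =>
      let pp := PySem.List.sorted (PySem.Set.ofList (l0 ++ l1)) (fun x => x) false
      let start := plast - mnv_distance
      let stop := p0 + mnv_distance
      pp.foldl (fun acc n => if n ≥ start ∧ n ≤ stop then acc ++ [n] else acc) []
    | _, _ => []  -- KeyError: excluded by Pre_
  | _, _ => []  -- IndexError (empty p): excluded by Pre_

-- ===== PORT B =====
-- B's while-loop-then-insert: walk past the elements < n, then insert n unless it is already there
def pvInsUniq (n : Int) : List Int → List Int
  | [] => [n]
  | x :: xs => if x < n then x :: pvInsUniq n xs else if x = n then x :: xs else n :: x :: xs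

def expandPoint_alt (p : List Int) (mnv_distance : Int) (pos_dict : List (Int × List Int)) : List Int :=
  ((PySem.List.pyGet? p (-1)).bind fun plast =>
    (PySem.List.pyGet? p 0).bind fun p0 =>
      ((PySem.Dict.mk pos_dict).get? p0).bind fun l0 =>
        ((PySem.Dict.mk pos_dict).get? plast).map fun l1 =>
          let start := plast - mnv_distance
          let stop := p0 + mnv_distance
          (l0 ++ l1).foldl (fun out n => if start ≤ n ∧ n ≤ stop then pvInsUniq n out else out)
            []).getD []  -- none (IndexError/KeyError in A) excluded by Pre_

-- ===== PRECONDITION & SPEC =====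
-- Pre_ excludes exactly the inputs where the Python A raises: empty p (IndexError) and
-- p[0] or p[-1] missing from pos_dict (KeyError).
def Pre_expandPoint (p : List Int) (mnv_distance : Int) (pos_dict : List (Int × List Int)) : Prop :=
  p ≠ [] ∧ p.headI ∈ pos_dict.map Prod.fst ∧ p.getLastI ∈ pos_dict.map Prod.fst
instance (p : List Int) (mnv_distance : Int) (pos_dict : List (Int × List Int)) : Decidable (Pre_expandPoint p mnv_distance pos_dict) := by unfold Pre_expandPoint; infer_instance

def pvWitness_expandPoint : List Int × Int × (List (Int × List Int)) :=
  ([3, 7], 2, [(3, [1, 4, 6]), (7, [4, 8, 9])])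

def Spec_expandPoint (p : List Int) (mnv_distance : Int) (pos_dict : List (Int × List Int)) (out : List Int) : Prop := out = expandPoint_alt p mnv_distance pos_dict
instance (p : List Int) (mnv_distance : Int) (pos_dict : List (Int × List Int)) (out : List Int) : Decidable (Spec_expandPoint p mnv_distance pos_dict out) := by unfold Spec_expandPoint; infer_instance

-- ===== CLAIM =====
def Claim_equal_expandPoint : Prop := ∀ (p : List Int) (mnv_distance : Int) (pos_dict : List (Int × List Int)), Dom_expandPoint p mnv_distance pos_dict → Pre_expandPoint p mnv_distance pos_dict → Spec_expandPoint p mnv_distance pos_dict (expandPoint p mnv_distance pos_dict)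

-- ===== LEMMAS AND PROOFS =====

theorem mem_pvInsUniq (n : Int) (l : List Int) (x : Int) :
    x ∈ pvInsUniq n l ↔ x = n ∨ x ∈ l := by
  induction l with
  | nil => simp [pvInsUniq]
  | cons a t ih =>
    by_cases h1 : a < n
    · simp [pvInsUniq, h1, ih]; tauto
    · by_cases h2 : a = n
      · simp [pvInsUniq, h1, h2]
      · simp [pvInsUniq, h1, h2]

theorem pairwise_pvInsUniq (n : Int) (l : List Int) (h : l.Pairwise (· < ·)) :
    (pvInsUniq n l).Pairwise (· < ·) := by
  induction l with
  | nil => simp [pvInsUniq]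
  | cons a t ih =>
    rcases List.pairwise_cons.mp h with ⟨ha, ht⟩
    by_cases h1 : a < n
    · simp only [pvInsUniq, if_pos h1]
      refine List.pairwise_cons.mpr ⟨?_, ih ht⟩
      intro y hy
      rcases (mem_pvInsUniq n t y).mp hy with rfl | hy'
      · exact h1
      · exact ha y hy'
    · by_cases h2 : a = n
      · simpa [pvInsUniq, h1, h2] using h
      · have hn : n < a := lt_of_le_of_ne (not_lt.mp h1) (fun e => h2 e.symm)
        simp only [pvInsUniq, if_neg h1, if_neg h2]
        refine List.pairwise_cons.mpr ⟨?_, h⟩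
        intro y hy
        rcases hy with _ | hy'
        · exact hn
        · exact lt_trans hn (ha y (by assumption))

theorem mem_foldl_pvInsUniq (L acc : List Int) (x : Int) :
    x ∈ L.foldl (fun out n => pvInsUniq n out) acc ↔ x ∈ acc ∨ x ∈ L := by
  induction L generalizing acc with
  | nil => simp
  | cons a t ih => simp [List.foldl_cons, ih, mem_pvInsUniq]; tauto

theorem pairwise_foldl_pvInsUniq (L acc : List Int) (h : acc.Pairwise (· < ·)) :
    (L.foldl (fun out n => pvInsUniq n out) acc).Pairwise (· < ·) := by
  induction L generalizing acc with
  | nil => exact h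
  | cons a t ih => exact ih _ (pairwise_pvInsUniq a acc h)

-- filtering into pvInsUniq folds = plain pvInsUniq fold over the filtered list
theorem foldl_ins_ite_eq_filter (q : Int → Prop) [DecidablePred q] (L acc : List Int) :
    L.foldl (fun out n => if q n then pvInsUniq n out else out) acc
    = (L.filter (fun n => decide (q n))).foldl (fun out n => pvInsUniq n out) acc := by
  induction L generalizing acc with
  | nil => rfl
  | cons a t ih =>
    by_cases h : q a <;> simp [List.foldl_cons, List.filter_cons, h, ih]

-- the insertion fold computes exactly sorted(set(L))
theorem foldl_ins_eq_sorted (L : List Int) :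
    L.foldl (fun out n => pvInsUniq n out) []
    = PySem.List.sorted (PySem.Set.ofList L) (fun x => x) false := by
  refine (PySem.List.sorted_eq_of_perm_of_pairwise_lt _ _ _ ?_ ?_).symm
  · have hnd : (L.foldl (fun out n => pvInsUniq n out) []).Nodup :=
      (pairwise_foldl_pvInsUniq L [] (by simp)).imp (fun h => ne_of_lt h)
    refine (List.perm_ext_iff_of_nodup hnd (PySem.Set.nodup_ofList L)).mpr ?_
    intro x
    simp [mem_foldl_pvInsUniq, PySem.Set.mem_ofList]
  · exact pairwise_foldl_pvInsUniq L [] (by simp)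

-- A's filter of the sorted dedup equals the sorted dedup of the filtered list
theorem filter_sorted_ofList (L : List Int) (q : Int → Bool) :
    (PySem.List.sorted (PySem.Set.ofList L) (fun x => x) false).filter q
    = PySem.List.sorted (PySem.Set.ofList (L.filter q)) (fun x => x) false := by
  refine (PySem.List.sorted_eq_of_perm_of_pairwise_lt _ _ _ ?_ ?_).symm
  · refine ((PySem.List.sorted_perm _ _ _).filter q).trans ?_
    refine (List.perm_ext_iff_of_nodup ((PySem.Set.nodup_ofList L).filter q)
      (PySem.Set.nodup_ofList _)).mpr ?_
    intro x
    simp [PySem.Set.mem_ofList, List.mem_filter, and_comm]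
  · exact (PySem.List.sorted_ofList_pairwise_lt L).filter q

-- ===== VERDICT =====
theorem expandPoint_spec : Claim_equal_expandPoint := by
  intro p mnv_distance pos_dict _hDom hPre
  obtain ⟨hne, h0, hl⟩ := hPre
  unfold Spec_expandPoint expandPoint expandPoint_alt
  obtain ⟨a, t, rfl⟩ := List.exists_cons_of_ne_nil hne
  have hget0 : PySem.List.pyGet? (a :: t) 0 = some ((a :: t).headI) :=
    PySem.List.pyGet?_zero_cons a t
  have hgetl : PySem.List.pyGet? (a :: t) (-1) = some ((a :: t).getLastI) := by
    rw [PySem.List.pyGet?_neg_one,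
      List.getLast?_eq_some_getLast (l := a :: t) (by simp),
      List.getLastI_eq_getLast?_getD,
      List.getLast?_eq_some_getLast (l := a :: t) (by simp)]
    simp
  have hk0 : ∃ l0, (PySem.Dict.mk pos_dict).get? ((a :: t).headI) = some l0 := by
    rw [← Option.ne_none_iff_exists']
    rw [ne_eq, PySem.Dict.get?_eq_none_iff_not_mem_keys, not_not]
    simpa [PySem.Dict.keys, PySem.Dict.items] using h0
  have hkl : ∃ l1, (PySem.Dict.mk pos_dict).get? ((a :: t).getLastI) = some l1 := by
    rw [← Option.ne_none_iff_exists']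
    rw [ne_eq, PySem.Dict.get?_eq_none_iff_not_mem_keys, not_not]
    simpa [PySem.Dict.keys, PySem.Dict.items] using hl
  obtain ⟨l0, h0eq⟩ := hk0
  obtain ⟨l1, h1eq⟩ := hkl
  rw [hget0, hgetl]
  simp only [h0eq, h1eq, Option.bind_some, Option.map_some, Option.getD_some]
  rw [PySem.List.foldl_append_ite_eq_filter, List.nil_append,
    filter_sorted_ofList, foldl_ins_ite_eq_filter, foldl_ins_eq_sorted]
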